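-- pv_equiv track=rewrite | github.com/elroi773/Coding-Test | 프로그래머스/3/87391. 공 이동 시뮬레이션/공 이동 시뮬레이션.py | solution
-- ===== SOURCE A (Python) =====
-- def solution(n, m, x, y, queries):
--     # 가능한 시작점의 범위(역방향으로 확장)
--     r1 = r2 = x  # row [r1, r2]
--     c1 = c2 = y  # col [c1, c2]
--
--     for cmd, dx in reversed(queries):
--         if cmd == 0:  # (정방향) 왼쪽: col 감소 -> (역방향) 오른쪽으로 되돌림
--             if c1 != 0:
--                 c1 += dx
--             # c1 == 0 이면, 원래 더 왼쪽(음수)에서 오지 못하니 0 유지(클램프 구간 포함)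
--             c2 = min(m - 1, c2 + dx)
--
--         elif cmd == 1:  # (정방향) 오른쪽: col 증가 -> (역방향) 왼쪽으로 되돌림
--             c1 = max(0, c1 - dx)
--             if c2 != m - 1:
--                 c2 -= dx
--             # c2 == m-1 이면, 클램프되어 m-1로 몰린 시작점들이 존재 가능 => m-1 유지
--
--         elif cmd == 2:  # (정방향) 위: row 감소 -> (역방향) 아래로 되돌림
--             if r1 != 0:
--                 r1 += dx
--             r2 = min(n - 1, r2 + dx)
--
--         else:  # cmd == 3 (정방향) 아래: row 증가 -> (역방향) 위로 되돌림
--             r1 = max(0, r1 - dx)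
--             if r2 != n - 1:
--                 r2 -= dx
--
--         # 범위가 뒤집히면 가능한 시작점이 없음
--         if r1 > r2 or c1 > c2:
--             return 0
--
--     return (r2 - r1 + 1) * (c2 - c1 + 1)
-- ===== SOURCE B (Python) =====
-- def solution(n, m, x, y, queries):
--     # Two independent reverse passes: column commands (0/1) and row commands
--     # (2 / everything else) never interact; an 'ever inverted' flag per
--     # dimension replaces A's immediate return 0.
--     c1 = c2 = y
--     cbad = False
--     for cmd, dx in reversed(queries):
--         if cmd == 0:
--             if c1 != 0:
--                 c1 += dx
--             c2 = min(m - 1, c2 + dx)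
--         elif cmd == 1:
--             c1 = max(0, c1 - dx)
--             if c2 != m - 1:
--                 c2 -= dx
--         else:
--             continue
--         cbad = cbad or c1 > c2
--
--     r1 = r2 = x
--     rbad = False
--     for cmd, dx in reversed(queries):
--         if cmd == 2:
--             if r1 != 0:
--                 r1 += dx
--             r2 = min(n - 1, r2 + dx)
--         elif cmd != 0 and cmd != 1:
--             r1 = max(0, r1 - dx)
--             if r2 != n - 1:
--                 r2 -= dx
--         else:
--             continue
--         rbad = rbad or r1 > r2
--
--     if rbad or cbad:
--         return 0
--     return (r2 - r1 + 1) * (c2 - c1 + 1)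
-- ===== Notes on version B (the rewrite author's own statement) =====
-- stated objective: alternative
-- what changed: A interleaves row and column updates in one reverse pass with an early return 0 on inversion; B splits it into two independent reverse passes (columns, then rows), each keeping an 'ever inverted' flag, and combines the results at the end.
import Mathlib
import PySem

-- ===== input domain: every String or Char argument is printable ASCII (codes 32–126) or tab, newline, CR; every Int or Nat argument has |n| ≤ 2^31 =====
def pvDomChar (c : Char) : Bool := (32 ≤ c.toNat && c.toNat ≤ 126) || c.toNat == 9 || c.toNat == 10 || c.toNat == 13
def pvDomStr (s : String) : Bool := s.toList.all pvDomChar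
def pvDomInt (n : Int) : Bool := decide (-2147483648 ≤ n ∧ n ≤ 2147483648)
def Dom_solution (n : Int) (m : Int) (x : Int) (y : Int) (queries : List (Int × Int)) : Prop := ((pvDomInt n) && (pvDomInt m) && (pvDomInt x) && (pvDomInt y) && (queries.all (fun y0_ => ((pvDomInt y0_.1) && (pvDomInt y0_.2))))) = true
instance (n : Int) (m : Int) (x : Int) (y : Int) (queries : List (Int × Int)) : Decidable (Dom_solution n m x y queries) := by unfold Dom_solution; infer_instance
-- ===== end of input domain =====

-- B replaces A's single interleaved reverse pass (early return 0 on inversion) by two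
-- independent reverse passes (columns, then rows) with per-dimension 'ever inverted' flags;
-- alternative decomposition, same cost.


-- ===== PORT A =====
-- one pass over reversed(queries); both dimensions updated in the same loop, early return 0
def aLoop (n : Int) (m : Int) (qs : List (Int × Int)) (r1 r2 c1 c2 : Int) : Int :=
  match qs with
  | [] => (r2 - r1 + 1) * (c2 - c1 + 1)
  | (cmd, dx) :: rest =>
    if cmd == 0 then
      let c1' := if c1 != 0 then c1 + dx else c1
      let c2' := min (m - 1) (c2 + dx)
      if r1 > r2 ∨ c1' > c2' then 0 else aLoop n m rest r1 r2 c1' c2'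
    else if cmd == 1 then
      let c1' := max 0 (c1 - dx)
      let c2' := if c2 != m - 1 then c2 - dx else c2
      if r1 > r2 ∨ c1' > c2' then 0 else aLoop n m rest r1 r2 c1' c2'
    else if cmd == 2 then
      let r1' := if r1 != 0 then r1 + dx else r1
      let r2' := min (n - 1) (r2 + dx)
      if r1' > r2' ∨ c1 > c2 then 0 else aLoop n m rest r1' r2' c1 c2
    else
      let r1' := max 0 (r1 - dx)
      let r2' := if r2 != n - 1 then r2 - dx else r2
      if r1' > r2' ∨ c1 > c2 then 0 else aLoop n m rest r1' r2' c1 c2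

def solution (n : Int) (m : Int) (x : Int) (y : Int) (queries : List (Int × Int)) : Int :=
  aLoop n m queries.reverse x x y y

-- ===== PORT B =====
-- pass 1: column commands only, over reversed(queries), with an 'ever inverted' flag
def colLoop (m : Int) (qs : List (Int × Int)) (c1 c2 : Int) (bad : Bool) : Int × Int × Bool :=
  match qs with
  | [] => (c1, c2, bad)
  | (cmd, dx) :: rest =>
    if cmd == 0 then
      let c1' := if c1 != 0 then c1 + dx else c1
      let c2' := min (m - 1) (c2 + dx)
      colLoop m rest c1' c2' (bad || decide (c1' > c2'))
    else if cmd == 1 then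
      let c1' := max 0 (c1 - dx)
      let c2' := if c2 != m - 1 then c2 - dx else c2
      colLoop m rest c1' c2' (bad || decide (c1' > c2'))
    else
      colLoop m rest c1 c2 bad

-- pass 2: row commands only (cmd 2, and anything that is not 0/1/2 = A's else branch)
def rowLoop (n : Int) (qs : List (Int × Int)) (r1 r2 : Int) (bad : Bool) : Int × Int × Bool :=
  match qs with
  | [] => (r1, r2, bad)
  | (cmd, dx) :: rest =>
    if cmd == 2 then
      let r1' := if r1 != 0 then r1 + dx else r1
      let r2' := min (n - 1) (r2 + dx)
      rowLoop n rest r1' r2' (bad || decide (r1' > r2'))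
    else if cmd != 0 && cmd != 1 then
      let r1' := max 0 (r1 - dx)
      let r2' := if r2 != n - 1 then r2 - dx else r2
      rowLoop n rest r1' r2' (bad || decide (r1' > r2'))
    else
      rowLoop n rest r1 r2 bad

def solution_alt (n : Int) (m : Int) (x : Int) (y : Int) (queries : List (Int × Int)) : Int :=
  let c := colLoop m queries.reverse y y false
  let r := rowLoop n queries.reverse x x false
  if r.2.2 || c.2.2 then 0 else (r.2.1 - r.1 + 1) * (c.2.1 - c.1 + 1)

-- ===== PRECONDITION & SPEC =====
def Spec_solution (n : Int) (m : Int) (x : Int) (y : Int) (queries : List (Int × Int)) (out : Int) : Prop := out = solution_alt n m x y queries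
instance (n : Int) (m : Int) (x : Int) (y : Int) (queries : List (Int × Int)) (out : Int) : Decidable (Spec_solution n m x y queries out) := by unfold Spec_solution; infer_instance

-- ===== CLAIM (what is proved, stated in full; the proofs are below) =====
def Claim_equal_solution : Prop := ∀ (n : Int) (m : Int) (x : Int) (y : Int) (queries : List (Int × Int)), Dom_solution n m x y queries → Spec_solution n m x y queries (solution n m x y queries)

-- ===== LEMMAS AND PROOFS =====

-- once the flag is set it stays set
theorem colLoop_bad_true (m : Int) (qs : List (Int × Int)) :
    ∀ c1 c2, (colLoop m qs c1 c2 true).2.2 = true := by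
  induction qs with
  | nil => intro c1 c2; rfl
  | cons q rest ih =>
    intro c1 c2
    obtain ⟨cmd, dx⟩ := q
    simp only [colLoop]
    split_ifs <;> simp [ih]

theorem rowLoop_bad_true (n : Int) (qs : List (Int × Int)) :
    ∀ r1 r2, (rowLoop n qs r1 r2 true).2.2 = true := by
  induction qs with
  | nil => intro r1 r2; rfl
  | cons q rest ih =>
    intro r1 r2
    obtain ⟨cmd, dx⟩ := q
    simp only [rowLoop]
    split_ifs <;> simp [ih]

-- the interleaved pass equals the two split passes, as long as the ranges start non-inverted
theorem aLoop_split (n m : Int) (qs : List (Int × Int)) :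
    ∀ r1 r2 c1 c2, r1 ≤ r2 → c1 ≤ c2 →
      aLoop n m qs r1 r2 c1 c2 =
        (if (rowLoop n qs r1 r2 false).2.2 || (colLoop m qs c1 c2 false).2.2 then 0
         else ((rowLoop n qs r1 r2 false).2.1 - (rowLoop n qs r1 r2 false).1 + 1) *
              ((colLoop m qs c1 c2 false).2.1 - (colLoop m qs c1 c2 false).1 + 1)) := by
  induction qs with
  | nil =>
    intro r1 r2 c1 c2 hr hc
    simp [aLoop, colLoop, rowLoop]
  | cons q rest ih =>
    intro r1 r2 c1 c2 hr hc
    obtain ⟨cmd, dx⟩ := q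
    by_cases h0 : cmd = 0
    · subst h0
      have e0 : ((0 : Int) == 0) = true := by decide
      have e2 : ¬ ((0 : Int) == 2) = true := by decide
      have ea : ¬ (((0 : Int) != 0) && ((0 : Int) != 1)) = true := by decide
      simp only [aLoop, colLoop, rowLoop, if_pos e0, if_neg e2, if_neg ea]
      set c1' := if c1 != 0 then c1 + dx else c1 with hc1'
      set c2' := min (m - 1) (c2 + dx) with hc2'
      by_cases hinv : c1' > c2'
      · rw [if_pos (Or.inr hinv)]
        have hb : (false || decide (c1' > c2')) = true := by simp [hinv]
        rw [hb]
        simp [colLoop_bad_true]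
      · rw [if_neg (by omega)]
        have hb : (false || decide (c1' > c2')) = false := by simp [hinv]
        rw [hb]
        exact ih r1 r2 c1' c2' hr (not_lt.mp hinv)
    · by_cases h1 : cmd = 1
      · subst h1
        have e0 : ¬ ((1 : Int) == 0) = true := by decide
        have e1 : ((1 : Int) == 1) = true := by decide
        have e2 : ¬ ((1 : Int) == 2) = true := by decide
        have ea : ¬ (((1 : Int) != 0) && ((1 : Int) != 1)) = true := by decide
        simp only [aLoop, colLoop, rowLoop, if_neg e0, if_pos e1, if_neg e2, if_neg ea]
        set c1' := max 0 (c1 - dx) with hc1'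
        set c2' := if c2 != m - 1 then c2 - dx else c2 with hc2'
        by_cases hinv : c1' > c2'
        · rw [if_pos (Or.inr hinv)]
          have hb : (false || decide (c1' > c2')) = true := by simp [hinv]
          rw [hb]
          simp [colLoop_bad_true]
        · rw [if_neg (by omega)]
          have hb : (false || decide (c1' > c2')) = false := by simp [hinv]
          rw [hb]
          exact ih r1 r2 c1' c2' hr (not_lt.mp hinv)
      · by_cases h2 : cmd = 2
        · subst h2
          have e0 : ¬ ((2 : Int) == 0) = true := by decide
          have e1 : ¬ ((2 : Int) == 1) = true := by decide
          have e2 : ((2 : Int) == 2) = true := by decide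
          simp only [aLoop, colLoop, rowLoop, if_neg e0, if_neg e1, if_pos e2]
          set r1' := if r1 != 0 then r1 + dx else r1 with hr1'
          set r2' := min (n - 1) (r2 + dx) with hr2'
          by_cases hinv : r1' > r2'
          · rw [if_pos (Or.inl hinv)]
            have hb : (false || decide (r1' > r2')) = true := by simp [hinv]
            rw [hb]
            simp [rowLoop_bad_true]
          · rw [if_neg (by omega)]
            have hb : (false || decide (r1' > r2')) = false := by simp [hinv]
            rw [hb]
            exact ih r1' r2' c1 c2 (not_lt.mp hinv) hc
        · have e0 : ¬ (cmd == 0) = true := by simp [h0]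
          have e1 : ¬ (cmd == 1) = true := by simp [h1]
          have e2 : ¬ (cmd == 2) = true := by simp [h2]
          have ea : ((cmd != 0) && (cmd != 1)) = true := by simp [h0, h1]
          simp only [aLoop, colLoop, rowLoop, if_neg e0, if_neg e1, if_neg e2, if_pos ea]
          set r1' := max 0 (r1 - dx) with hr1'
          set r2' := if r2 != n - 1 then r2 - dx else r2 with hr2'
          by_cases hinv : r1' > r2'
          · rw [if_pos (Or.inl hinv)]
            have hb : (false || decide (r1' > r2')) = true := by simp [hinv]
            rw [hb]
            simp [rowLoop_bad_true]
          · rw [if_neg (by omega)]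
            have hb : (false || decide (r1' > r2')) = false := by simp [hinv]
            rw [hb]
            exact ih r1' r2' c1 c2 (not_lt.mp hinv) hc

-- ===== VERDICT (by name: the statement is the Claim_ definition above) =====
theorem solution_spec : Claim_equal_solution := by
  intro n m x y queries _
  show solution n m x y queries = solution_alt n m x y queries
  exact aLoop_split n m queries.reverse x x y y le_rfl le_rfl
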